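-- pv_equiv track=rewrite | github.com/authorofnaught/ling402-examples | week/11/foo.py | convert
-- ===== SOURCE A (Python) =====
-- def convert(word):
--
--     twoLetterGraphemes=["ch"]
--     oneLetterGraphemes=["b","D","a","q", "'", "H", "p", "l"]
--
--     sounds={"b" : "b",
--             "ch": "t͡ʃ",
--             "D" : "ɖ",
--             "a" : "ɑ",
--             "q" : "qʰ",
--             "'" : "ʔ",
--             "p" : "pʰ",
--             "H" : "x",
--             "l" : "l"
--            }
--
--
--     start=0
--     end=len(word)
--
--     result = ""
--
--     while start < end:
--
--         if word[start:start+2] in twoLetterGraphemes: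
--             result += sounds[word[start:start+2]]
--             start += 2
--
--         else:
--             result += sounds[word[start:start+1]]
--             start += 1
--
--     return result
-- ===== SOURCE B (Python) =====
-- def convert(word):
--     sounds = {"b": "b", "\x01": "t\u0361\u0283", "D": "\u0256", "a": "\u0251",
--               "q": "q\u02b0", "'": "\u0294", "p": "p\u02b0", "H": "x", "l": "l"}
--     return "".join(sounds[c] for c in word.replace("ch", "\x01"))
-- ===== Notes on version B (the rewrite author's own statement) =====
-- stated objective: simpler
-- what changed: Replaces A's manual index-walking while-loop (slicing, membership test against the two-letter-grapheme list, two advance branches) by one str.replace collapsing the single two-letter grapheme into a one-character placeholder, followed by a plain per-character dictionary join.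
import Mathlib
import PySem

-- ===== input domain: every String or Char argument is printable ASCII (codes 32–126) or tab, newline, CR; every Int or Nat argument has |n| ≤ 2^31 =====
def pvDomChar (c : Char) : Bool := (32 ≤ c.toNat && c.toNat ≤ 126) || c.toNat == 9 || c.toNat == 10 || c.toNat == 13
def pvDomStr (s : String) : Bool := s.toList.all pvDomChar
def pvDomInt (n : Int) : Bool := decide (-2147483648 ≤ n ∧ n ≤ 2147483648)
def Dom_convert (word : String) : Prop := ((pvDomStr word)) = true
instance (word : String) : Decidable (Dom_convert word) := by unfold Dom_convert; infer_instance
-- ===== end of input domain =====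

-- B replaces A's index-walking while-loop by one str.replace that collapses the single
-- two-letter grapheme "ch" into a placeholder, followed by a per-character dict join (objective: simpler).

-- ===== PORT A =====
-- the `sounds` dict of A
def pvSoundsA : PySem.Dict String String :=
  PySem.Dict.ofList [("b","b"),("ch","t͡ʃ"),("D","ɖ"),("a","ɑ"),("q","qʰ"),("'","ʔ"),("p","pʰ"),("H","x"),("l","l")]

-- the while-loop of A: `start`/`endn` index into `chars`, `result` is the accumulator;
-- `none` = the KeyError Python raises on an unknown grapheme (excluded by Pre_convert)
def pvLoopA (chars : List Char) (endn : Nat) (start : Nat) (result : List Char) : Option (List Char) :=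
  if _h : start < endn then
    if [("ch".toList)].contains (PySem.List.slice chars (some (start:Int)) (some ((start:Int)+2))) then
      match pvSoundsA.get? (String.ofList (PySem.List.slice chars (some (start:Int)) (some ((start:Int)+2)))) with
      | some v => pvLoopA chars endn (start+2) (result ++ v.toList)
      | none => none
    else
      match pvSoundsA.get? (String.ofList (PySem.List.slice chars (some (start:Int)) (some ((start:Int)+1)))) with
      | some v => pvLoopA chars endn (start+1) (result ++ v.toList)
      | none => none
  else some result
termination_by endn - start

def convert (word : String) : String :=
  ((pvLoopA word.toList word.toList.length 0 []).map String.ofList).getD ""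

-- ===== PORT B =====
-- B's dict: 'ch' already collapsed to the placeholder '\x01'
def pvSoundsB : PySem.Dict String String :=
  PySem.Dict.ofList [("b","b"),("\x01","t͡ʃ"),("D","ɖ"),("a","ɑ"),("q","qʰ"),("'","ʔ"),("p","pʰ"),("H","x"),("l","l")]

def convert_alt (word : String) : String :=
  match (PySem.Str.replace word "ch" "\x01").toList.mapM
      (fun c => pvSoundsB.get? (String.ofList [c])) with
  | some vs => String.ofList ((vs.map String.toList).flatten)
  | none => ""   -- the KeyError (excluded by Pre_convert)

-- ===== PRECONDITION & SPEC =====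
-- Pre_ admits exactly the words A converts without a KeyError: every character is one of
-- A's graphemes, every 'c' is immediately followed by 'h' and every 'h' immediately
-- preceded by 'c' (otherwise the while-loop hits a character with no entry in `sounds`).
def pvPairOK (p : Char × Char) : Bool :=
  (!(p.1 == 'c') || p.2 == 'h') && (!(p.2 == 'h') || p.1 == 'c')

def Pre_convert (word : String) : Prop :=
  (word.toList.all (fun c => c ∈ ['b','D','a','q','\'','p','H','l','c','h'])) = true ∧
  ((word.toList.zip word.toList.tail).all pvPairOK) = true ∧
  word.toList.head? ≠ some 'h' ∧ word.toList.getLast? ≠ some 'c'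
instance (word : String) : Decidable (Pre_convert word) := by unfold Pre_convert; infer_instance

def pvWitness_convert : String := "bach'ql"

def Spec_convert (word : String) (out : String) : Prop := out = convert_alt word
instance (word : String) (out : String) : Decidable (Spec_convert word out) := by unfold Spec_convert; infer_instance

-- ===== CLAIM (what is proved, stated in full; the proofs are below) =====
def Claim_equal_convert : Prop := ∀ (word : String), Dom_convert word → Pre_convert word → Spec_convert word (convert word)

-- ===== LEMMAS AND PROOFS =====

-- the sound of a single one-letter grapheme (proof-side spec)
def pvOne : Char → List Char
  | 'b' => "b".toList | 'D' => "ɖ".toList | 'a' => "ɑ".toList | 'q' => "qʰ".toList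
  | '\'' => "ʔ".toList | 'p' => "pʰ".toList | 'H' => "x".toList | 'l' => "l".toList
  | _ => []

-- the intended transliteration (common spec both ports are proved equal to)
def pvTok : List Char → List Char
  | 'c' :: 'h' :: rest => "t͡ʃ".toList ++ pvTok rest
  | c :: rest => pvOne c ++ pvTok rest
  | [] => []

theorem pvTok_cons_of_ne {c : Char} {rest : List Char} (hc : c ≠ 'c') :
    pvTok (c :: rest) = pvOne c ++ pvTok rest := by
  rw [pvTok.eq_def]
  split
  · next h1 => exfalso; injection h1 with h1a _; exact hc h1a
  · next h1 => injection h1 with ha hb; subst ha; subst hb; rfl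
  · next h1 => simp at h1

-- validity of a (suffix of the) word, as Pre_convert states it
def pvValid (l : List Char) : Prop :=
  (l.all (fun c => c ∈ ['b','D','a','q','\'','p','H','l','c','h'])) = true ∧
  ((l.zip l.tail).all pvPairOK) = true ∧
  l.head? ≠ some 'h' ∧ l.getLast? ≠ some 'c'

theorem pvValid_tail_ch {rest : List Char} (h : pvValid ('c' :: 'h' :: rest)) : pvValid rest := by
  obtain ⟨hall, hpair, _, hlast⟩ := h
  simp only [List.all_cons, Bool.and_eq_true] at hall
  refine ⟨hall.2.2, ?_, ?_, ?_⟩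
  · cases rest with
    | nil => simp
    | cons y t =>
      simp only [List.tail_cons, List.zip_cons_cons, List.all_cons, Bool.and_eq_true] at hpair ⊢
      exact hpair.2.2
  · cases rest with
    | nil => simp
    | cons y t =>
      simp only [List.tail_cons, List.zip_cons_cons, List.all_cons, Bool.and_eq_true,
        pvPairOK] at hpair
      intro hy
      simp only [List.head?_cons, Option.some.injEq] at hy
      subst hy
      simp at hpair
  · cases rest with
    | nil => simp
    | cons y t => simpa [List.getLast?_cons_cons] using hlast

theorem pvValid_tail_one {c : Char} {rest : List Char} (h : pvValid (c :: rest))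
    (hc : c ≠ 'c') : pvValid rest := by
  obtain ⟨hall, hpair, _, hlast⟩ := h
  simp only [List.all_cons, Bool.and_eq_true] at hall
  refine ⟨hall.2, ?_, ?_, ?_⟩
  · cases rest with
    | nil => simp
    | cons y t =>
      simp only [List.tail_cons, List.zip_cons_cons, List.all_cons, Bool.and_eq_true] at hpair ⊢
      exact hpair.2
  · cases rest with
    | nil => simp
    | cons y t =>
      simp only [List.tail_cons, List.zip_cons_cons, List.all_cons, Bool.and_eq_true,
        pvPairOK] at hpair
      intro hy
      simp only [List.head?_cons, Option.some.injEq] at hy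
      subst hy
      have := hpair.1.2
      simp at this
      exact hc this
  · cases rest with
    | nil => simp
    | cons y t => simpa [List.getLast?_cons_cons] using hlast

-- in a valid word a leading 'c' is always followed by 'h'
theorem pvValid_c_head {c : Char} {rest : List Char} (h : pvValid (c :: rest)) (hc : c = 'c') :
    ∃ t, rest = 'h' :: t := by
  obtain ⟨_, hpair, _, hlast⟩ := h
  cases rest with
  | nil => subst hc; simp at hlast
  | cons y t =>
    simp only [List.tail_cons, List.zip_cons_cons, List.all_cons, Bool.and_eq_true,
      pvPairOK] at hpair
    subst hc
    have := hpair.1.1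
    simp at this
    exact ⟨t, by rw [this]⟩

-- ===== A-side: the while-loop computes pvTok =====

theorem pvLoopA_eq (n : Nat) : ∀ (l chars : List Char) (start : Nat) (acc : List Char),
    l.length ≤ n → chars.drop start = l → pvValid l →
    pvLoopA chars chars.length start acc = some (acc ++ pvTok l) := by
  induction n with
  | zero =>
    intro l chars start acc hn hdrop _
    have hl : l = [] := List.eq_nil_of_length_eq_zero (Nat.le_zero.mp hn)
    subst hl
    have hge : chars.length ≤ start := by
      have := congrArg List.length hdrop; simp [List.length_drop] at this; omega
    rw [pvLoopA]; simp [Nat.not_lt.mpr hge, pvTok]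
  | succ n ih =>
    intro l chars start acc hn hdrop hval
    cases l with
    | nil =>
      have hge : chars.length ≤ start := by
        have := congrArg List.length hdrop; simp [List.length_drop] at this; omega
      rw [pvLoopA]; simp [Nat.not_lt.mpr hge, pvTok]
    | cons c rest =>
      have hlt : start < chars.length := by
        have := congrArg List.length hdrop; simp [List.length_drop] at this; omega
      have hslice2 : PySem.List.slice chars (some (start:Int)) (some ((start:Int)+2))
          = (c :: rest).take 2 := by
        have h2 : ((start:Int)+2) = ((start+2 : Nat) : Int) := by push_cast; ring
        rw [h2, PySem.List.slice_natCast, hdrop]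
        congr 1; omega
      have hslice1 : PySem.List.slice chars (some (start:Int)) (some ((start:Int)+1))
          = (c :: rest).take 1 := by
        have h1 : ((start:Int)+1) = ((start+1 : Nat) : Int) := by push_cast; ring
        rw [h1, PySem.List.slice_natCast, hdrop]
        congr 1; omega
      by_cases hc : c = 'c'
      · obtain ⟨t, ht⟩ := pvValid_c_head hval hc
        subst hc; subst ht
        have hdrop2 : chars.drop (start+2) = t := by
          have h22 : chars.drop (start + 2) = (chars.drop start).drop 2 := by
            rw [List.drop_drop]
          rw [h22, hdrop]; rfl
        have hrec := ih t chars (start+2) (acc ++ "t͡ʃ".toList)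
          (by simp only [List.length_cons] at hn; omega) hdrop2 (pvValid_tail_ch hval)
        rw [pvLoopA]
        simp only [hlt, dif_pos, hslice2]
        rw [show (('c' :: 'h' :: t).take 2) = "ch".toList from rfl]
        rw [if_pos (by simp)]
        rw [show pvSoundsA.get? (String.ofList ("ch".toList)) = some "t͡ʃ" from rfl]
        show pvLoopA chars chars.length (start+2) (acc ++ ("t͡ʃ" : String).toList)
            = some (acc ++ pvTok ('c' :: 'h' :: t))
        rw [hrec]
        simp [pvTok]
      · -- single-letter grapheme
        have hh : c ≠ 'h' := by
          have := hval.2.2.1; simp at this; exact this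
        have hslice_ne : (c :: rest).take 2 ≠ "ch".toList := by
          cases rest with
          | nil => simp [show "ch".toList = ['c','h'] from rfl]
          | cons y t =>
            simp only [List.take, show "ch".toList = ['c','h'] from rfl, ne_eq,
              List.cons.injEq, not_and]
            intro h; exact absurd h hc
        have hmem : c ∈ ['b','D','a','q','\'','p','H','l','c','h'] := by
          have := hval.1
          simp only [List.all_cons, Bool.and_eq_true, decide_eq_true_eq] at this
          exact this.1
        have hdrop1 : chars.drop (start+1) = rest := by
          have h11 : chars.drop (start + 1) = (chars.drop start).drop 1 := by
            rw [List.drop_drop]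
          rw [h11, hdrop]; rfl
        have hrec := ih rest chars (start+1) (acc ++ pvOne c)
          (by simp only [List.length_cons] at hn; omega) hdrop1 (pvValid_tail_one hval hc)
        have hget : pvSoundsA.get? (String.ofList [c]) = some (String.ofList (pvOne c)) := by
          fin_cases hmem <;> first | rfl | (exfalso; exact hc rfl) | (exfalso; exact hh rfl)
        have hOne : (String.ofList (pvOne c)).toList = pvOne c := by
          fin_cases hmem <;> rfl
        rw [pvLoopA]
        simp only [hlt, dif_pos, hslice2, hslice1]
        rw [if_neg (by simpa using hslice_ne)]
        rw [show ((c :: rest).take 1) = [c] from rfl, hget]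
        show pvLoopA chars chars.length (start+1) (acc ++ (String.ofList (pvOne c)).toList)
            = some (acc ++ pvTok (c :: rest))
        rw [hOne, hrec, pvTok_cons_of_ne hc, List.append_assoc]

-- ===== B-side: str.replace computes pvSub, then the per-character join computes pvTok =====

-- non-overlapping leftmost replacement of "ch" by the placeholder (spec of str.replace here)
def pvSub : List Char → List Char
  | 'c' :: 'h' :: rest => '\x01' :: pvSub rest
  | c :: rest => c :: pvSub rest
  | [] => []

theorem pvSub_cons_of_ne {c : Char} {rest : List Char}
    (h : ¬ (("ch".toList).isPrefixOf (c :: rest) = true)) :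
    pvSub (c :: rest) = c :: pvSub rest := by
  rw [pvSub.eq_def]
  split
  · next h1 =>
    exfalso
    injection h1 with h1a h1b
    subst h1a
    cases rest with
    | nil => cases h1b
    | cons y t =>
      injection h1b with h2a _; subst h2a
      simp [List.isPrefixOf] at h
  · next h1 => injection h1 with ha hb; subst ha; subst hb; rfl
  · next h1 => simp at h1

theorem pvReplaceGo_eq (fuel : Nat) : ∀ (l acc : List Char), l.length ≤ fuel →
    PySem.Chars.replace.go "ch".toList "\x01".toList fuel l acc = acc.reverse ++ pvSub l := by
  induction fuel with
  | zero =>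
    intro l acc hn
    have hl : l = [] := List.eq_nil_of_length_eq_zero (Nat.le_zero.mp hn)
    subst hl
    rw [PySem.Chars.replace.go.eq_def]; simp [pvSub]
  | succ fuel ih =>
    intro l acc hn
    cases l with
    | nil => rw [PySem.Chars.replace.go.eq_def]; simp [pvSub]
    | cons c t =>
      rw [PySem.Chars.replace.go.eq_def]
      simp only []
      by_cases hp : ("ch".toList).isPrefixOf (c :: t) = true
      · rw [if_pos hp]
        have hpre : "ch".toList <+: (c :: t) := List.isPrefixOf_iff_prefix.mp hp
        obtain ⟨r, hr⟩ := hpre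
        have hct : c :: t = 'c' :: 'h' :: r := by rw [← hr]; rfl
        rw [hct]
        rw [show List.drop ("ch".toList).length ('c' :: 'h' :: r) = r from rfl]
        rw [ih r _ (by rw [hct] at hn; simp only [List.length_cons] at hn; omega)]
        simp [pvSub]
      · rw [if_neg hp]
        rw [ih t _ (by simp only [List.length_cons] at hn; omega)]
        rw [pvSub_cons_of_ne hp]
        simp

theorem pvReplace_eq (l : List Char) :
    PySem.Chars.replace l "ch".toList "\x01".toList = pvSub l := by
  rw [PySem.Chars.replace]
  rw [if_neg (by simp)]
  simpa using pvReplaceGo_eq l.length l [] le_rfl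

-- B's mapM over the replaced word succeeds on a valid word and flattens to pvTok
theorem pvMapM_sub (n : Nat) : ∀ (l : List Char), l.length ≤ n → pvValid l →
    ∃ vs : List String,
      (pvSub l).mapM (fun c => pvSoundsB.get? (String.ofList [c])) = some vs ∧
      (vs.map String.toList).flatten = pvTok l := by
  induction n with
  | zero =>
    intro l hn _
    have hl : l = [] := List.eq_nil_of_length_eq_zero (Nat.le_zero.mp hn)
    subst hl
    exact ⟨[], by simp [pvSub], by simp [pvTok]⟩
  | succ n ih =>
    intro l hn hval
    cases l with
    | nil => exact ⟨[], by simp [pvSub], by simp [pvTok]⟩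
    | cons c rest =>
      by_cases hc : c = 'c'
      · obtain ⟨t, ht⟩ := pvValid_c_head hval hc
        subst hc; subst ht
        obtain ⟨vs, h1, h2⟩ := ih t (by simp only [List.length_cons] at hn; omega) (pvValid_tail_ch hval)
        refine ⟨"t͡ʃ" :: vs, ?_, ?_⟩
        · rw [show pvSub ('c' :: 'h' :: t) = '\x01' :: pvSub t from rfl]
          simp only [List.mapM_cons, h1]
          rw [show pvSoundsB.get? (String.ofList ['\x01']) = some "t͡ʃ" from rfl]
          rfl
        · simp [pvTok, h2]
      · have hh : c ≠ 'h' := by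
          have := hval.2.2.1; simp at this; exact this
        have hmem : c ∈ ['b','D','a','q','\'','p','H','l','c','h'] := by
          have := hval.1
          simp only [List.all_cons, Bool.and_eq_true, decide_eq_true_eq] at this
          exact this.1
        obtain ⟨vs, h1, h2⟩ := ih rest (by simp only [List.length_cons] at hn; omega) (pvValid_tail_one hval hc)
        have hget : pvSoundsB.get? (String.ofList [c]) = some (String.ofList (pvOne c)) := by
          fin_cases hmem <;> first | rfl | (exfalso; exact hc rfl) | (exfalso; exact hh rfl)
        have hOne : (String.ofList (pvOne c)).toList = pvOne c := by
          fin_cases hmem <;> rfl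
        have hsub : pvSub (c :: rest) = c :: pvSub rest := by
          apply pvSub_cons_of_ne
          intro hp
          obtain ⟨r, hr⟩ := List.isPrefixOf_iff_prefix.mp hp
          apply hc
          have h0 := congrArg List.head? hr
          simp at h0
          exact h0.symm
        refine ⟨String.ofList (pvOne c) :: vs, ?_, ?_⟩
        · rw [hsub]
          simp only [List.mapM_cons, h1, hget]
          rfl
        · simp only [List.map_cons, List.flatten_cons, hOne, h2, pvTok_cons_of_ne hc]

theorem convert_eq_tok (word : String) (h : pvValid word.toList) :
    convert word = String.ofList (pvTok word.toList) := by
  unfold convert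
  rw [pvLoopA_eq word.toList.length word.toList word.toList 0 [] le_rfl (by simp) h]
  rfl

theorem convert_alt_eq_tok (word : String) (h : pvValid word.toList) :
    convert_alt word = String.ofList (pvTok word.toList) := by
  unfold convert_alt
  rw [PySem.Str.toList_replace, pvReplace_eq]
  obtain ⟨vs, h1, h2⟩ := pvMapM_sub word.toList.length word.toList le_rfl h
  rw [h1]
  show String.ofList ((List.map String.toList vs).flatten) = String.ofList (pvTok word.toList)
  rw [h2]

-- ===== VERDICT (by name: the statement is the Claim_ definition above) =====
theorem convert_spec : Claim_equal_convert := by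
  intro word _ hpre
  unfold Spec_convert
  rw [convert_eq_tok word hpre, convert_alt_eq_tok word hpre]
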